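-- pv_equiv track=rewrite | github.com/nheist/eswc2023-nastylinker | impl/util/hierarchy_graph.py | _find_parents_for_node_in_candidates
-- ===== SOURCE A (Python) =====
-- def _find_parents_for_node_in_candidates(node_LH, candidates, target_LH):
--     # get rid of candidates that contain information which is not contained in node
--     candidates = {cand for cand in candidates if not target_LH[cand].difference(node_LH)}
--     # find candidates that have the highest overlap in lexical head
--     lemma_matches = {cand: len(target_LH[cand].intersection(node_LH)) for cand in candidates}
--     highest_match_score = max(lemma_matches.values(), default=0)
--     if highest_match_score > 0:
--         # select the nodes that have the best matching lexical head
--         return {cand for cand, score in lemma_matches.items() if score == highest_match_score}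
--     else:
--         # if no related nodes are found, use the most generic node (if available)
--         return {cand for cand in candidates if len(target_LH[cand]) == 0}
-- ===== SOURCE B (Python) =====
-- def _find_parents_for_node_in_candidates(node_LH, candidates, target_LH):
--     # single running-max pass: keep the best overlap score and the tie set of candidates;
--     # the score-0 tie group is exactly A's "most generic node" fallback
--     best_score = 0
--     best = set()
--     for cand in candidates:
--         lh = target_LH[cand]
--         if lh - node_LH:
--             continue  # cand contains information not in node
--         score = len(lh & node_LH)
--         if score > best_score:
--             best_score = score
--             best = {cand}
--         elif score == best_score:
--             best.add(cand)
--     return best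
-- ===== Notes on version B (the rewrite author's own statement) =====
-- stated objective: simpler
-- what changed: Replaces A's multi-pass pipeline (filter survivors, build a candidate-to-score dict, take the max of its values, re-filter the dict items, with a separate 'most generic node' fallback branch) by one running-max pass over the candidates that maintains the best score and its tie set; the score-0 tie group coincides with A's fallback, so the branch disappears.
import Mathlib
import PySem

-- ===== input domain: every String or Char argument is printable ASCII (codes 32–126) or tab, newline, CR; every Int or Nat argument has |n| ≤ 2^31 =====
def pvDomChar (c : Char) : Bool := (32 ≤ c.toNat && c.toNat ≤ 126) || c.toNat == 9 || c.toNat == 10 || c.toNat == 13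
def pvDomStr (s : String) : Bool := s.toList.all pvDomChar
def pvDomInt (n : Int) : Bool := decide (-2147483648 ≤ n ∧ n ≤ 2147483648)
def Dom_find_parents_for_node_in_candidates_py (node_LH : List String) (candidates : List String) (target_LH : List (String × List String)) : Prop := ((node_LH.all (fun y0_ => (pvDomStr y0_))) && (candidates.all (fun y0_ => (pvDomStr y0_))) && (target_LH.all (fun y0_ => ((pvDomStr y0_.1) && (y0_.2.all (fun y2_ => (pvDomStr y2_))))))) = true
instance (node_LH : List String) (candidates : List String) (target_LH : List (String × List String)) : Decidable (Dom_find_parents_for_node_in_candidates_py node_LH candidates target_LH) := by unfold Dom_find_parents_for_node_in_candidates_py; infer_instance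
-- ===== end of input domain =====

-- B replaces A's multi-pass pipeline (survivor filter, score dict, max, re-filter, separate
-- "generic node" fallback branch) with a single running-max pass keeping the best score and its
-- tie set; objective: simpler.

-- ===== PORT A =====
def find_parents_for_node_in_candidates_py (node_LH : List String) (candidates : List String) (target_LH : List (String × List String)) : List String :=
  -- target_LH[cand] — a missing key is a KeyError in Python; Pre_ excludes that, so getD [] is exact on Pre_
  let lh : String → List String := fun c => (PySem.Dict.mk target_LH).getD c []
  -- candidates = {cand for cand in candidates if not target_LH[cand].difference(node_LH)}
  let cands2 : PySem.Set String :=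
    PySem.Set.ofList (candidates.filter (fun c => (PySem.Set.diff (lh c) node_LH).isEmpty))
  -- lemma_matches = {cand: len(target_LH[cand].intersection(node_LH)) for cand in candidates}
  let lemma_matches : PySem.Dict String Int :=
    cands2.foldl (fun d c => d.insert c (PySem.Set.len (PySem.Set.inter (lh c) node_LH))) PySem.Dict.empty
  -- highest_match_score = max(lemma_matches.values(), default=0)
  let highest_match_score : Int := (PySem.List.max? (PySem.Dict.values lemma_matches) (fun x => x)).getD 0
  if 0 < highest_match_score then
    PySem.Set.ofList (((PySem.Dict.items lemma_matches).filter (fun p => p.2 == highest_match_score)).map Prod.fst)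
  else
    PySem.Set.ofList (cands2.filter (fun c => PySem.Set.len (lh c) == 0))

-- ===== PORT B =====
def find_parents_for_node_in_candidates_py_alt (node_LH : List String) (candidates : List String) (target_LH : List (String × List String)) : List String :=
  let lh : String → List String := fun c => (PySem.Dict.mk target_LH).getD c []
  (candidates.foldl (fun (st : Int × PySem.Set String) cand =>
      let l := lh cand
      if (PySem.Set.diff l node_LH).isEmpty then
        let score : Int := PySem.Set.len (PySem.Set.inter l node_LH)
        if st.1 < score then (score, [cand])
        else if score == st.1 then (st.1, PySem.Set.add st.2 cand)
        else st
      else st)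
    ((0 : Int), (PySem.Set.empty : PySem.Set String))).2

-- ===== PRECONDITION & SPEC =====
-- Pre_ excludes exactly the inputs on which A raises KeyError: a candidate that is not a key of target_LH.
def Pre_find_parents_for_node_in_candidates_py (node_LH : List String) (candidates : List String) (target_LH : List (String × List String)) : Prop :=
  ∀ c ∈ candidates, c ∈ target_LH.map Prod.fst
instance (node_LH : List String) (candidates : List String) (target_LH : List (String × List String)) : Decidable (Pre_find_parents_for_node_in_candidates_py node_LH candidates target_LH) := by unfold Pre_find_parents_for_node_in_candidates_py; infer_instance

def pvWitness_find_parents_for_node_in_candidates_py : List String × List String × (List (String × List String)) :=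
  (["a", "b"], ["x", "y"], [("x", ["a"]), ("y", [])])

def Spec_find_parents_for_node_in_candidates_py (node_LH : List String) (candidates : List String) (target_LH : List (String × List String)) (out : List String) : Prop := out = find_parents_for_node_in_candidates_py_alt node_LH candidates target_LH
instance (node_LH : List String) (candidates : List String) (target_LH : List (String × List String)) (out : List String) : Decidable (Spec_find_parents_for_node_in_candidates_py node_LH candidates target_LH out) := by unfold Spec_find_parents_for_node_in_candidates_py; infer_instance

-- ===== CLAIM (what is proved, stated in full; the proofs are below) =====
def Claim_equal_find_parents_for_node_in_candidates_py : Prop := ∀ (node_LH : List String) (candidates : List String) (target_LH : List (String × List String)), Dom_find_parents_for_node_in_candidates_py node_LH candidates target_LH → Pre_find_parents_for_node_in_candidates_py node_LH candidates target_LH → Spec_find_parents_for_node_in_candidates_py node_LH candidates target_LH (find_parents_for_node_in_candidates_py node_LH candidates target_LH)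

-- ===== LEMMAS AND PROOFS =====

-- abbreviations for the quantities both ports compute
def pvLH (target_LH : List (String × List String)) (c : String) : List String :=
  (PySem.Dict.mk target_LH).getD c []
def pvSurv (node_LH : List String) (target_LH : List (String × List String)) (c : String) : Bool :=
  (PySem.Set.diff (pvLH target_LH c) node_LH).isEmpty
def pvScore (node_LH : List String) (target_LH : List (String × List String)) (c : String) : Int :=
  PySem.Set.len (PySem.Set.inter (pvLH target_LH c) node_LH)

-- running max over f-values
def pvFMax (f : String → Int) (l : List String) (a : Int) : Int :=
  l.foldl (fun m c => max m (f c)) a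

theorem pvFMax_init_le (f : String → Int) (l : List String) (a : Int) : a ≤ pvFMax f l a := by
  induction l generalizing a with
  | nil => simp [pvFMax]
  | cons x xs ih =>
      have h := ih (max a (f x))
      simp only [pvFMax, List.foldl_cons] at h ⊢
      exact le_trans (le_max_left _ _) h

theorem pvFMax_le_of_mem (f : String → Int) (l : List String) (a : Int) (c : String) (hc : c ∈ l) :
    f c ≤ pvFMax f l a := by
  induction l generalizing a with
  | nil => simp at hc
  | cons x xs ih =>
      simp only [pvFMax, List.foldl_cons]
      rcases List.mem_cons.1 hc with h | h
      · subst h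
        exact le_trans (le_max_right a (f c)) (pvFMax_init_le f xs _)
      · exact ih _ h

theorem pvFMax_cases (f : String → Int) (l : List String) (a : Int) :
    pvFMax f l a = a ∨ ∃ c ∈ l, f c = pvFMax f l a := by
  induction l generalizing a with
  | nil => exact Or.inl rfl
  | cons x xs ih =>
      simp only [pvFMax, List.foldl_cons] at *
      rcases ih (max a (f x)) with h | ⟨c, hc, hfc⟩
      · rcases max_choice a (f x) with hm | hm
        · exact Or.inl (h.trans hm)
        · exact Or.inr ⟨x, List.mem_cons_self, (h.trans hm).symm⟩
      · exact Or.inr ⟨c, List.mem_cons_of_mem _ hc, hfc⟩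

-- a unique characterisation of "the max of nonnegative values with default 0"
def pvIsMax (f : String → Int) (l : List String) (m : Int) : Prop :=
  0 ≤ m ∧ (∀ c ∈ l, f c ≤ m) ∧ (m = 0 ∨ ∃ c ∈ l, f c = m)

theorem pvIsMax_unique (f : String → Int) (l : List String) (m₁ m₂ : Int)
    (h₁ : pvIsMax f l m₁) (h₂ : pvIsMax f l m₂) : m₁ = m₂ := by
  obtain ⟨hn₁, hb₁, he₁⟩ := h₁
  obtain ⟨hn₂, hb₂, he₂⟩ := h₂
  rcases he₁ with rfl | ⟨c, hc, hfc⟩ <;> rcases he₂ with rfl | ⟨d, hd, hfd⟩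
  · rfl
  · have := hb₁ d hd; omega
  · have := hb₂ c hc; omega
  · have := hb₁ d hd; have := hb₂ c hc; omega

theorem pvIsMax_congr_mem (f : String → Int) (l l' : List String) (m : Int)
    (hmem : ∀ c, c ∈ l ↔ c ∈ l') (h : pvIsMax f l m) : pvIsMax f l' m := by
  obtain ⟨hn, hb, he⟩ := h
  refine ⟨hn, fun c hc => hb c ((hmem c).2 hc), ?_⟩
  rcases he with h0 | ⟨c, hc, hfc⟩
  · exact Or.inl h0
  · exact Or.inr ⟨c, (hmem c).1 hc, hfc⟩

theorem pvIsMax_fmax (f : String → Int) (l : List String) : pvIsMax f l (pvFMax f l 0) := by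
  refine ⟨pvFMax_init_le f l 0, fun c hc => pvFMax_le_of_mem f l 0 c hc, ?_⟩
  rcases pvFMax_cases f l 0 with h | h
  · exact Or.inl h
  · exact Or.inr h

theorem pvIsMax_max? (f : String → Int) (l : List String) (hnn : ∀ c ∈ l, 0 ≤ f c) :
    pvIsMax f l ((PySem.List.max? (l.map f) (fun x => x)).getD 0) := by
  cases hmx : PySem.List.max? (l.map f) (fun x => x) with
  | none =>
      have hl : l.map f = [] := (PySem.List.max?_eq_none_iff _ _).1 hmx
      have hl' : l = [] := List.map_eq_nil_iff.1 hl
      subst hl'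
      exact ⟨le_refl 0, by simp, Or.inl rfl⟩
  | some m =>
      have hmem : m ∈ l.map f := PySem.List.max?_mem hmx
      obtain ⟨c, hc, hfc⟩ := List.mem_map.1 hmem
      have hmax : ∀ y ∈ l.map f, y ≤ m := PySem.List.max?_isMax hmx
      refine ⟨hfc ▸ hnn c hc, fun d hd => hmax (f d) (List.mem_map.2 ⟨d, hd, rfl⟩), ?_⟩
      exact Or.inr ⟨c, hc, hfc⟩

-- Set.ofList lemmas
theorem pvOfList_append_singleton (xs : List String) (c : String) :
    PySem.Set.ofList (xs ++ [c]) = PySem.Set.add (PySem.Set.ofList xs) c := by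
  simp [PySem.Set.ofList_eq_foldl, List.foldl_append]

theorem pvFilter_add (s : PySem.Set String) (c : String) (p : String → Bool) :
    (PySem.Set.add s c).filter p
      = if p c then PySem.Set.add (s.filter p) c else s.filter p := by
  by_cases hc : c ∈ s <;> by_cases hp : p c = true <;>
    simp [PySem.Set.add, hc, hp, List.filter_append, List.mem_filter]

theorem pvOfList_filter (xs : List String) (p : String → Bool) :
    PySem.Set.ofList (xs.filter p) = (PySem.Set.ofList xs).filter p := by
  induction xs using List.reverseRecOn with
  | nil => rfl
  | append_singleton xs c ih =>
      rw [List.filter_append, pvOfList_append_singleton, pvFilter_add]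
      by_cases hp : p c = true
      · simp [hp, pvOfList_append_singleton, ih]
      · simp [hp, ih]

-- every survivor's lexical head is contained in node_LH, so its score is its full length
theorem pvSurv_inter (node_LH : List String) (target_LH : List (String × List String)) (c : String)
    (h : pvSurv node_LH target_LH c = true) :
    PySem.Set.inter (pvLH target_LH c) node_LH = pvLH target_LH c := by
  have hemp : PySem.Set.diff (pvLH target_LH c) node_LH = [] := by
    simpa [pvSurv, List.isEmpty_iff] using h
  show (pvLH target_LH c).filter (fun x => node_LH.contains x) = pvLH target_LH c
  apply List.filter_eq_self.2
  intro x hx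
  have hxn : x ∈ node_LH := by
    simpa using List.filter_eq_nil_iff.1 hemp x hx
  simpa using hxn

theorem pvScore_nonneg (node_LH : List String) (target_LH : List (String × List String)) (c : String) :
    0 ≤ pvScore node_LH target_LH c := by
  simp [pvScore, PySem.Set.len]

-- named pieces of the two ports (rfl-equal to the respective subterms)
def pvStep (node_LH : List String) (target_LH : List (String × List String))
    (st : Int × PySem.Set String) (cand : String) : Int × PySem.Set String :=
  if pvSurv node_LH target_LH cand then
    if st.1 < pvScore node_LH target_LH cand then (pvScore node_LH target_LH cand, [cand])
    else if pvScore node_LH target_LH cand == st.1 then (st.1, PySem.Set.add st.2 cand)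
    else st
  else st

def pvS (node_LH : List String) (target_LH : List (String × List String)) (cs : List String) : List String :=
  cs.filter (pvSurv node_LH target_LH)

def pvS' (node_LH : List String) (target_LH : List (String × List String)) (cs : List String) : PySem.Set String :=
  PySem.Set.ofList (pvS node_LH target_LH cs)

def pvDict (node_LH : List String) (target_LH : List (String × List String)) (cs : List String) : PySem.Dict String Int :=
  (pvS' node_LH target_LH cs).foldl (fun d c => d.insert c (pvScore node_LH target_LH c)) PySem.Dict.empty

def pvM (node_LH : List String) (target_LH : List (String × List String)) (cs : List String) : Int :=
  (PySem.List.max? (PySem.Dict.values (pvDict node_LH target_LH cs)) (fun x => x)).getD 0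

theorem pvA_eq (node_LH : List String) (target_LH : List (String × List String)) (cs : List String) :
    find_parents_for_node_in_candidates_py node_LH cs target_LH
      = if 0 < pvM node_LH target_LH cs then
          PySem.Set.ofList (((PySem.Dict.items (pvDict node_LH target_LH cs)).filter
            (fun p => p.2 == pvM node_LH target_LH cs)).map Prod.fst)
        else
          PySem.Set.ofList ((pvS' node_LH target_LH cs).filter
            (fun c => PySem.Set.len (pvLH target_LH c) == 0)) := rfl

theorem pvB_eq (node_LH : List String) (target_LH : List (String × List String)) (cs : List String) :
    find_parents_for_node_in_candidates_py_alt node_LH cs target_LH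
      = (cs.foldl (pvStep node_LH target_LH) ((0 : Int), ([] : PySem.Set String))).2 := rfl

-- characterisation of B's loop
theorem pvB_loop (node_LH : List String) (target_LH : List (String × List String)) (l : List String) :
    l.foldl (pvStep node_LH target_LH) ((0 : Int), ([] : PySem.Set String))
    = (pvFMax (pvScore node_LH target_LH) (pvS node_LH target_LH l) 0,
       PySem.Set.ofList ((pvS node_LH target_LH l).filter
         (fun c => pvScore node_LH target_LH c == pvFMax (pvScore node_LH target_LH) (pvS node_LH target_LH l) 0))) := by
  induction l using List.reverseRecOn with
  | nil => rfl
  | append_singleton xs c ih =>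
      rw [List.foldl_append, ih, List.foldl_cons, List.foldl_nil]
      by_cases hs : pvSurv node_LH target_LH c = true
      · have hfil : pvS node_LH target_LH (xs ++ [c]) = pvS node_LH target_LH xs ++ [c] := by
          simp [pvS, List.filter_append, hs]
        have hM : pvFMax (pvScore node_LH target_LH) (pvS node_LH target_LH xs ++ [c]) 0
            = max (pvFMax (pvScore node_LH target_LH) (pvS node_LH target_LH xs) 0)
                  (pvScore node_LH target_LH c) := by
          simp [pvFMax, List.foldl_append]
        rw [hfil, hM]
        rcases lt_trichotomy (pvFMax (pvScore node_LH target_LH) (pvS node_LH target_LH xs) 0)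
            (pvScore node_LH target_LH c) with hlt | heq | hgt
        · -- new strict maximum: reset the tie set to [c]
          have hnil : (pvS node_LH target_LH xs).filter
              (fun x => pvScore node_LH target_LH x == pvScore node_LH target_LH c) = [] := by
            apply List.filter_eq_nil_iff.2
            intro x hx
            have := pvFMax_le_of_mem (pvScore node_LH target_LH) (pvS node_LH target_LH xs) 0 x hx
            simp only [beq_iff_eq]
            omega
          simp [pvStep, hs, hlt, max_eq_right (le_of_lt hlt), List.filter_append, hnil,
                PySem.Set.ofList_eq_foldl, PySem.Set.add]
        · -- tie with the current maximum: add c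
          have hmax : max (pvFMax (pvScore node_LH target_LH) (pvS node_LH target_LH xs) 0)
              (pvScore node_LH target_LH c)
              = pvFMax (pvScore node_LH target_LH) (pvS node_LH target_LH xs) 0 := by omega
          have h1 : ¬ (pvFMax (pvScore node_LH target_LH) (pvS node_LH target_LH xs) 0
              < pvScore node_LH target_LH c) := by omega
          have h2 : (pvScore node_LH target_LH c
              == pvFMax (pvScore node_LH target_LH) (pvS node_LH target_LH xs) 0) = true :=
            beq_iff_eq.2 heq.symm
          rw [hmax]
          simp [pvStep, hs, h1, h2, List.filter_append, pvOfList_append_singleton]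
        · -- smaller score: state unchanged, c filtered out
          have hmax : max (pvFMax (pvScore node_LH target_LH) (pvS node_LH target_LH xs) 0)
              (pvScore node_LH target_LH c)
              = pvFMax (pvScore node_LH target_LH) (pvS node_LH target_LH xs) 0 := by omega
          have hne : (pvScore node_LH target_LH c
              == pvFMax (pvScore node_LH target_LH) (pvS node_LH target_LH xs) 0) = false := by
            simp only [beq_eq_false_iff_ne, ne_eq]
            omega
          simp [pvStep, hs, not_lt_of_gt hgt, hne, hmax, List.filter_append]
      · have hfil : pvS node_LH target_LH (xs ++ [c]) = pvS node_LH target_LH xs := by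
          simp [pvS, List.filter_append, hs]
        simp [pvStep, hs, hfil]

theorem pvMain (node_LH : List String) (target_LH : List (String × List String)) (cs : List String) :
    find_parents_for_node_in_candidates_py node_LH cs target_LH
      = find_parents_for_node_in_candidates_py_alt node_LH cs target_LH := by
  rw [pvA_eq, pvB_eq, pvB_loop]
  have hS' : pvS' node_LH target_LH cs = PySem.Set.ofList (pvS node_LH target_LH cs) := rfl
  have hSnodup : (pvS' node_LH target_LH cs).Nodup := PySem.Set.nodup_ofList _
  have hmem : ∀ x, x ∈ pvS node_LH target_LH cs ↔ x ∈ pvS' node_LH target_LH cs :=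
    fun x => (PySem.Set.mem_ofList _ _).symm
  have hitems : (pvDict node_LH target_LH cs).items
      = (pvS' node_LH target_LH cs).map (fun c => (c, pvScore node_LH target_LH c)) := by
    have h := PySem.Dict.items_foldl_insert_fresh (κ := String) (ν := Int) (β := String)
      (pvS' node_LH target_LH cs) (fun a => a) (fun a => pvScore node_LH target_LH a)
      PySem.Dict.empty (fun a _ => PySem.Dict.contains_empty a) (by simpa using hSnodup)
    simpa [pvDict] using h
  have hvals : PySem.Dict.values (pvDict node_LH target_LH cs)
      = (pvS' node_LH target_LH cs).map (pvScore node_LH target_LH) := by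
    show (pvDict node_LH target_LH cs).items.map (·.2) = _
    rw [hitems, List.map_map]
    rfl
  have hM1 : pvIsMax (pvScore node_LH target_LH) (pvS' node_LH target_LH cs) (pvM node_LH target_LH cs) := by
    rw [pvM, hvals]
    exact pvIsMax_max? _ _ (fun c _ => pvScore_nonneg node_LH target_LH c)
  have hM2 : pvIsMax (pvScore node_LH target_LH) (pvS' node_LH target_LH cs)
      (pvFMax (pvScore node_LH target_LH) (pvS node_LH target_LH cs) 0) :=
    pvIsMax_congr_mem _ _ _ _ hmem (pvIsMax_fmax _ _)
  have hMM : pvM node_LH target_LH cs = pvFMax (pvScore node_LH target_LH) (pvS node_LH target_LH cs) 0 :=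
    pvIsMax_unique _ _ _ _ hM1 hM2
  rw [← hMM,
    pvOfList_filter (pvS node_LH target_LH cs)
      (fun c => pvScore node_LH target_LH c == pvM node_LH target_LH cs), ← hS']
  by_cases hpos : 0 < pvM node_LH target_LH cs
  · rw [if_pos hpos, hitems, List.filter_map, List.map_map]
    have hcomp : ((Prod.fst : String × Int → String) ∘ fun c => (c, pvScore node_LH target_LH c))
        = fun c => c := rfl
    rw [hcomp, List.map_id']
    have hpred : ((fun p => p.2 == pvM node_LH target_LH cs)
        ∘ fun c => (c, pvScore node_LH target_LH c))
        = fun c => pvScore node_LH target_LH c == pvM node_LH target_LH cs := rfl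
    rw [hpred, PySem.Set.ofList_eq_self_of_nodup _ (hSnodup.filter _)]
  · -- no positive overlap: every surviving candidate has an empty lexical head
    have hM0 : pvM node_LH target_LH cs = 0 := by
      have := hM1.1
      omega
    have hzero : ∀ c ∈ pvS' node_LH target_LH cs, pvScore node_LH target_LH c = 0 := by
      intro c hc
      have h1 := hM1.2.1 c hc
      have h2 := pvScore_nonneg node_LH target_LH c
      omega
    have hlen : ∀ c ∈ pvS' node_LH target_LH cs,
        PySem.Set.len (pvLH target_LH c) = pvScore node_LH target_LH c := by
      intro c hc
      have hsurv : pvSurv node_LH target_LH c = true := by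
        have hcS : c ∈ pvS node_LH target_LH cs := (hmem c).2 hc
        exact List.of_mem_filter hcS
      show PySem.Set.len (pvLH target_LH c) = PySem.Set.len (PySem.Set.inter (pvLH target_LH c) node_LH)
      rw [pvSurv_inter node_LH target_LH c hsurv]
    rw [if_neg hpos]
    have hfa : (pvS' node_LH target_LH cs).filter
        (fun c => PySem.Set.len (pvLH target_LH c) == 0) = pvS' node_LH target_LH cs := by
      apply List.filter_eq_self.2
      intro c hc
      have h := hlen c hc
      rw [hzero c hc] at h
      simpa only [beq_iff_eq] using h
    have hfb : (pvS' node_LH target_LH cs).filter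
        (fun c => pvScore node_LH target_LH c == pvM node_LH target_LH cs) = pvS' node_LH target_LH cs := by
      apply List.filter_eq_self.2
      intro c hc
      simp [hzero c hc, hM0]
    rw [hfa, hfb, PySem.Set.ofList_eq_self_of_nodup _ hSnodup]

-- ===== VERDICT (by name: the statement is the Claim_ definition above) =====
theorem find_parents_for_node_in_candidates_py_spec : Claim_equal_find_parents_for_node_in_candidates_py := by
  intro node_LH candidates target_LH _hdom _hpre
  exact pvMain node_LH target_LH candidates
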